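-- pv_equiv track=rewrite | github.com/PrajwalMathad/Connect-4-AI | minimax/Connect4_Ai.py | evaluate_two_connected
-- ===== SOURCE A (Python) =====
-- TWO_CONNECTED_SCORE = {
--     5: 40000,
--     4: 30000,
--     3: 20000,
--     2: 10000
-- }
--
-- def evaluate_two_connected(grid, piece):
--     score = 0
--     directions = [(0, 1), (1, 1), (1, 0), (1, -1)]
--     for row in range(len(grid)):
--         for col in range(len(grid[0])):
--             if grid[row][col] == piece:
--                 for dr, dc in directions:
--                     count = 1
--                     r, c = row + dr, col + dc
--                     while 0 <= r < len(grid) and 0 <= c < len(grid[0]) and grid[r][c] == piece: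
--                         count += 1
--                         r += dr
--                         c += dc
--                     if count == 2:
--                         score += TWO_CONNECTED_SCORE[count]
--     return score
-- ===== SOURCE B (Python) =====
-- def evaluate_two_connected(grid, piece):
--     # O(1) local test per (cell, direction): a walk from (r, c) counts exactly 2
--     # iff the next cell holds the piece and the cell after it does not.
--     H = len(grid)
--     W = len(grid[0]) if grid else 0
--
--     def p(r, c):
--         return 0 <= r < H and 0 <= c < W and grid[r][c] == piece
--
--     return 10000 * sum(
--         1
--         for r in range(H)
--         for c in range(W)
--         if grid[r][c] == piece
--         for dr, dc in ((0, 1), (1, 1), (1, 0), (1, -1))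
--         if p(r + dr, c + dc) and not p(r + 2 * dr, c + 2 * dc)
--     )
-- ===== Notes on version B (the rewrite author's own statement) =====
-- stated objective: alternative
-- what changed: Replaces A's per-(cell,direction) while-walk along the run plus a dict lookup by a constant two-cell local test 'next cell is the piece and the one after is not', counted in one pass and multiplied by 10000 once.
import Mathlib
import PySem

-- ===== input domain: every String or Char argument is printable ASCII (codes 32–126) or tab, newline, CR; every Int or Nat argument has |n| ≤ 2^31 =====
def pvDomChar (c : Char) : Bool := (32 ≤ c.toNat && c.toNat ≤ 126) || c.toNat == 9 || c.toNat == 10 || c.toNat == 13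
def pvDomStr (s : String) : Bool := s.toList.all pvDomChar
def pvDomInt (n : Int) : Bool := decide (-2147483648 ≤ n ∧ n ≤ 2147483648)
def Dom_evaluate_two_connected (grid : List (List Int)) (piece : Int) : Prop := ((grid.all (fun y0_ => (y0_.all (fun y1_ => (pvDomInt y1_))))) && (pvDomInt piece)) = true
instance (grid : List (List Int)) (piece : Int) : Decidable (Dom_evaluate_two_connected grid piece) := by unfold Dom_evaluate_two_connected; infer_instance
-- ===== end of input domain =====

-- B replaces A's per-(cell, direction) while-walk (run counting + dict lookup) by a
-- two-cell local test ("next cell is piece, the one after is not"), summed and scaled once.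

-- ===== PORT A =====
-- grid[r][c] as an Option (none exactly where Python raises IndexError)
def cellA (grid : List (List Int)) (r c : Int) : Option Int :=
  (PySem.List.pyGet? grid r).bind (fun row => PySem.List.pyGet? row c)

-- the while loop: count, r, c evolve; fuel bounds the walk (each step moves r or c
-- strictly towards the H/W bound, so fuel = H + W + 2 never runs out on the real walk)
def walkA (grid : List (List Int)) (piece H W dr dc : Int) :
    Nat → Int → Int → Int → Int
  | 0, _, _, count => count
  | fuel + 1, r, c, count =>
      if 0 ≤ r ∧ r < H ∧ 0 ≤ c ∧ c < W ∧ cellA grid r c = some piece then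
        walkA grid piece H W dr dc fuel (r + dr) (c + dc) (count + 1)
      else count

def twoConnectedScore : PySem.Dict Int Int := PySem.Dict.ofList [(5, 40000), (4, 30000), (3, 20000), (2, 10000)]

def evaluate_two_connected (grid : List (List Int)) (piece : Int) : Int :=
  let dirs : List (Int × Int) := [(0, 1), (1, 1), (1, 0), (1, -1)]
  (PySem.List.pyRange 0 (grid.length : Int) 1).foldl (fun score row =>
    (PySem.List.pyRange 0 (grid.headI.length : Int) 1).foldl (fun score col =>
      if cellA grid row col = some piece then
        dirs.foldl (fun score d =>
          let count := walkA grid piece (grid.length : Int) (grid.headI.length : Int)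
            d.1 d.2 (grid.length + grid.headI.length + 2) (row + d.1) (col + d.2) 1
          -- TWO_CONNECTED_SCORE[count]: lookup is guarded by count == 2, so the key exists
          if count = 2 then score + (PySem.Dict.get? twoConnectedScore count).getD 0
          else score) score
      else score) score) 0

-- ===== PORT B =====
-- p(r, c) of Source B: in bounds and holds the piece (grid[r][c] via pyGet?, none ≠ piece)
def pB (grid : List (List Int)) (piece r c : Int) : Bool :=
  decide (0 ≤ r) && decide (r < (grid.length : Int)) &&
  decide (0 ≤ c) && decide (c < (grid.headI.length : Int)) &&
  ((PySem.List.pyGet? grid r).bind (fun row => PySem.List.pyGet? row c) == some piece)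

def evaluate_two_connected_alt (grid : List (List Int)) (piece : Int) : Int :=
  let dirs : List (Int × Int) := [(0, 1), (1, 1), (1, 0), (1, -1)]
  10000 *
    (PySem.List.pyRange 0 (grid.length : Int) 1).foldl (fun n r =>
      (PySem.List.pyRange 0 (grid.headI.length : Int) 1).foldl (fun n c =>
        if (PySem.List.pyGet? grid r).bind (fun row => PySem.List.pyGet? row c) == some piece then
          dirs.foldl (fun n d =>
            if pB grid piece (r + d.1) (c + d.2) && !pB grid piece (r + 2 * d.1) (c + 2 * d.2)
            then n + 1 else n) n
        else n) n) 0

-- ===== PRECONDITION & SPEC =====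
-- Pre_ excludes exactly the ragged grids on which Python A raises IndexError:
-- some row is shorter than the first row, so grid[row][col] fails for some col < len(grid[0]).
def Pre_evaluate_two_connected (grid : List (List Int)) (piece : Int) : Prop :=
  ∀ row ∈ grid, grid.headI.length ≤ row.length
instance (grid : List (List Int)) (piece : Int) : Decidable (Pre_evaluate_two_connected grid piece) := by
  unfold Pre_evaluate_two_connected; infer_instance

def pvWitness_evaluate_two_connected : List (List Int) × Int := ([[1, 1], [0, 1]], 1)

def Spec_evaluate_two_connected (grid : List (List Int)) (piece : Int) (out : Int) : Prop := out = evaluate_two_connected_alt grid piece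
instance (grid : List (List Int)) (piece : Int) (out : Int) : Decidable (Spec_evaluate_two_connected grid piece out) := by unfold Spec_evaluate_two_connected; infer_instance

-- ===== CLAIM (what is proved, stated in full; the proofs are below) =====
def Claim_equal_evaluate_two_connected : Prop := ∀ (grid : List (List Int)) (piece : Int), Dom_evaluate_two_connected grid piece → Pre_evaluate_two_connected grid piece → Spec_evaluate_two_connected grid piece (evaluate_two_connected grid piece)

-- ===== LEMMAS AND PROOFS =====

-- the while condition, as a Prop
def condA (grid : List (List Int)) (piece r c : Int) : Prop :=
  0 ≤ r ∧ r < (grid.length : Int) ∧ 0 ≤ c ∧ c < (grid.headI.length : Int) ∧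
    cellA grid r c = some piece

theorem pB_iff (grid : List (List Int)) (piece r c : Int) :
    pB grid piece r c = true ↔ condA grid piece r c := by
  simp [pB, condA, cellA, and_assoc]

theorem walkA_ge (grid : List (List Int)) (piece H W dr dc : Int) :
    ∀ (fuel : Nat) (r c count : Int), count ≤ walkA grid piece H W dr dc fuel r c count := by
  intro fuel
  induction fuel with
  | zero => intro r c count; simp [walkA]
  | succ f ih =>
      intro r c count
      simp only [walkA]
      split
      · exact le_trans (by omega) (ih (r + dr) (c + dc) (count + 1))
      · exact le_refl _

theorem walkA_eq_two_iff (grid : List (List Int)) (piece dr dc : Int)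
    (fuel : Nat) (r c : Int) :
    walkA grid piece (grid.length : Int) (grid.headI.length : Int) dr dc (fuel + 2) r c 1 = 2 ↔
      condA grid piece r c ∧ ¬ condA grid piece (r + dr) (c + dc) := by
  simp only [walkA]
  by_cases h1 : condA grid piece r c
  · rw [if_pos (by exact h1)]
    by_cases h2 : condA grid piece (r + dr) (c + dc)
    · rw [if_pos (by exact h2)]
      have := walkA_ge grid piece (grid.length : Int) (grid.headI.length : Int) dr dc fuel
        (r + dr + dr) (c + dc + dc) (1 + 1 + 1)
      constructor
      · intro hw; omega
      · rintro ⟨_, hn⟩; exact absurd h2 hn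
    · rw [if_neg (by exact h2)]
      simp [h1, h2]
  · rw [if_neg (by exact h1)]
    simp [h1]

-- fold with step "add 10000 when P" equals 10000 × fold with step "add 1 when P"
theorem foldl_mul_10000 {α : Type} (l : List α) (f g : Int → α → Int)
    (h : ∀ s x, x ∈ l → f (10000 * s) x = 10000 * g s x) :
    ∀ s : Int, l.foldl f (10000 * s) = 10000 * l.foldl g s := by
  induction l with
  | nil => intro s; simp
  | cons x xs ih =>
      intro s
      simp only [List.foldl_cons]
      rw [h s x (List.mem_cons_self), ih (fun s y hy => h s y (List.mem_cons_of_mem x hy))]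

theorem dict_get_two : (PySem.Dict.get? twoConnectedScore 2).getD 0 = 10000 := by decide

-- per-(cell, direction): A's "walk counts exactly 2, add 10000" = 10000 × B's local test
theorem dir_step_eq (grid : List (List Int)) (piece row col : Int) (d : Int × Int) (s : Int) :
    (if walkA grid piece (grid.length : Int) (grid.headI.length : Int)
        d.1 d.2 (grid.length + grid.headI.length + 2) (row + d.1) (col + d.2) 1 = 2 then
      10000 * s + (PySem.Dict.get? twoConnectedScore
        (walkA grid piece (grid.length : Int) (grid.headI.length : Int)
          d.1 d.2 (grid.length + grid.headI.length + 2) (row + d.1) (col + d.2) 1)).getD 0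
     else 10000 * s) =
    10000 * (if pB grid piece (row + d.1) (col + d.2) &&
               !pB grid piece (row + 2 * d.1) (col + 2 * d.2) then s + 1 else s) := by
  have hfu : grid.length + grid.headI.length + 2 = (grid.length + grid.headI.length) + 2 := rfl
  rw [hfu]
  by_cases hw : walkA grid piece (grid.length : Int) (grid.headI.length : Int)
      d.1 d.2 ((grid.length + grid.headI.length) + 2) (row + d.1) (col + d.2) 1 = 2
  · rw [if_pos hw, hw, dict_get_two]
    have h2 := (walkA_eq_two_iff grid piece d.1 d.2 (grid.length + grid.headI.length)
      (row + d.1) (col + d.2)).mp hw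
    have hb : (pB grid piece (row + d.1) (col + d.2) &&
        !pB grid piece (row + d.1 + d.1) (col + d.2 + d.2)) = true := by
      simp only [Bool.and_eq_true, Bool.not_eq_true']
      exact ⟨(pB_iff _ _ _ _).mpr h2.1, by
        rcases Bool.eq_false_or_eq_true (pB grid piece (row + d.1 + d.1) (col + d.2 + d.2)) with h | h
        · exact absurd ((pB_iff _ _ _ _).mp h) h2.2
        · exact h⟩
    have harith : row + 2 * d.1 = row + d.1 + d.1 := by ring
    have harith2 : col + 2 * d.2 = col + d.2 + d.2 := by ring
    rw [harith, harith2, if_pos hb]; ring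
  · rw [if_neg hw]
    have h2 := (walkA_eq_two_iff grid piece d.1 d.2 (grid.length + grid.headI.length)
      (row + d.1) (col + d.2)).not.mp hw
    have hb : (pB grid piece (row + d.1) (col + d.2) &&
        !pB grid piece (row + d.1 + d.1) (col + d.2 + d.2)) = false := by
      rw [Bool.and_eq_false_iff]
      by_cases hc1 : condA grid piece (row + d.1) (col + d.2)
      · right
        by_cases hc2 : condA grid piece (row + d.1 + d.1) (col + d.2 + d.2)
        · simp [(pB_iff _ _ _ _).mpr hc2]
        · exact absurd ⟨hc1, hc2⟩ h2
      · left
        rcases Bool.eq_false_or_eq_true (pB grid piece (row + d.1) (col + d.2)) with h | h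
        · exact absurd ((pB_iff _ _ _ _).mp h) hc1
        · exact h
    have harith : row + 2 * d.1 = row + d.1 + d.1 := by ring
    have harith2 : col + 2 * d.2 = col + d.2 + d.2 := by ring
    rw [harith, harith2, hb]; simp

-- ===== VERDICT (by name: the statement is the Claim_ definition above) =====
theorem evaluate_two_connected_spec : Claim_equal_evaluate_two_connected := by
  intro grid piece _ _
  unfold Spec_evaluate_two_connected evaluate_two_connected evaluate_two_connected_alt
  simp only []
  have h0 : (0 : Int) = 10000 * 0 := by norm_num
  rw [h0]
  refine foldl_mul_10000 _ _ _ ?_ 0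
  intro s row _
  refine foldl_mul_10000 _ _ _ ?_ s
  intro s col _
  by_cases hcell : cellA grid row col = some piece
  · rw [if_pos hcell, if_pos (by simp [cellA] at hcell ⊢; exact hcell)]
    refine foldl_mul_10000 _ _ _ ?_ s
    intro s d _
    exact dir_step_eq grid piece row col d s
  · rw [if_neg hcell, if_neg (by simp [cellA] at hcell ⊢; exact hcell)]
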